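/- GENERATED by mk_final_copies.py from the proof of the farm's unit `codebook_decode_scalar_raw.1` (farm:codebook_decode_scalar_raw.1.1: Proof.lean) as the
   re-elaboration sweep compiled it — do not edit. -/
import Asan.CheckWalk
import Vorbis.Spec.Units.codebook_decode_scalar_raw_1

open X86 X86.User Asan Vorbis Vorbis.Spec

set_option maxRecDepth 4000
set_option maxHeartbeats 4000000

namespace Vorbis.Spec.codebook_decode_scalar_raw_1

/-- **Where the struct at `c` is**, as one arithmetic fact for `u_omega`: above the text, inside the data space, off the own stack. -/
theorem book_where {others : List Obj} {frames : List (Nat × FrameLayout)} {Blk : Block → Prop} {len : Nat} {u : State}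
    (h : BookPre others frames Blk len u) (hroom : 0x700000 + 384 ≤ (u.reg .rsp).toNat) :
    0x119d40 ≤ (u.reg .rsi).toNat ∧ (u.reg .rsi).toNat + 2120 ≤ 0xC00000 ∧
      ((u.reg .rsp).toNat + 8 ≤ (u.reg .rsi).toNat ∨ (u.reg .rsi).toNat + 2120 ≤ 0x700000 ∨
        0x800000 ≤ (u.reg .rsi).toNat) := by
  obtain ⟨B, hB, hin⟩ := h.book
  have hs : Site (Live (stackObjs frames ++ others)) (u.reg .rsi).toNat 2120 :=
    Codebook.site_field h.reader.env.live hB hin 0 2120 (by decide) (by decide) rfl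
  have hw := site_where h.reader.shadow.inv h.reader.shadow.offText (by omega) hs
  have e : L.textHi = 0x119d40 := rfl
  omega

/-- **`CodebookOK c` and `BookApart f c` in a memory that differs from the entry memory only inside the function's stack frame
and the reader's windows of `*f`** (the state after prep_huffman and after every spill / return-address push of this segment). -/
theorem book_carry {others : List Obj} {frames : List (Nat × FrameLayout)} {Blk : Block → Prop} {len : Nat} {u : State}
    {m : Mem} (h : BookPre others frames Blk len u) (hroom : 0x700000 + 384 ≤ (u.reg .rsp).toNat)
    (htop : (u.reg .rsp).toNat + 8 ≤ 0x800000)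
    (hs : Mem.SameExcept
      [⟨(u.reg .rsp).toNat - 384, (u.reg .rsp).toNat⟩,
       ⟨(u.reg .rdi).toNat + 48, (u.reg .rdi).toNat + 56⟩, ⟨(u.reg .rdi).toNat + 84, (u.reg .rdi).toNat + 96⟩,
       ⟨(u.reg .rdi).toNat + 136, (u.reg .rdi).toNat + 144⟩, ⟨(u.reg .rdi).toNat + 1484, (u.reg .rdi).toNat + 1749⟩,
       ⟨(u.reg .rdi).toNat + 1752, (u.reg .rdi).toNat + 1784⟩] u.mem m) :
    CodebookOK Blk m (u.reg .rsi).toNat ∧ BookApart m (u.reg .rdi).toNat (u.reg .rsi).toNat := by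
  obtain ⟨B, hB, hin⟩ := h.book
  have hbw := book_where h hroom
  have hab := h.apart.book
  simp only [vblock, Off.sizeof.stb_vorbis, Off.sizeof.Codebook] at hab
  have hd1 : ∀ w, w ∈ [(⟨(u.reg .rsp).toNat - 384, (u.reg .rsp).toNat⟩ : Span),
       ⟨(u.reg .rdi).toNat + 48, (u.reg .rdi).toNat + 56⟩, ⟨(u.reg .rdi).toNat + 84, (u.reg .rdi).toNat + 96⟩,
       ⟨(u.reg .rdi).toNat + 136, (u.reg .rdi).toNat + 144⟩, ⟨(u.reg .rdi).toNat + 1484, (u.reg .rdi).toNat + 1749⟩,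
       ⟨(u.reg .rdi).toNat + 1752, (u.reg .rdi).toNat + 1784⟩] →
      (u.reg .rsi).toNat + Off.sizeof.Codebook ≤ w.lo ∨ w.hi ≤ (u.reg .rsi).toNat := by
    simp only [List.forall_mem_cons, List.not_mem_nil, false_imp_iff, implies_true, and_true, Off.sizeof.Codebook]
    omega
  have hd2 : 1 ≤ Codebook.sorted_entries u.mem (u.reg .rsi).toNat → ∀ w,
      w ∈ [(⟨(u.reg .rsp).toNat - 384, (u.reg .rsp).toNat⟩ : Span),
       ⟨(u.reg .rdi).toNat + 48, (u.reg .rdi).toNat + 56⟩, ⟨(u.reg .rdi).toNat + 84, (u.reg .rdi).toNat + 96⟩,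
       ⟨(u.reg .rdi).toNat + 136, (u.reg .rdi).toNat + 144⟩, ⟨(u.reg .rdi).toNat + 1484, (u.reg .rdi).toNat + 1749⟩,
       ⟨(u.reg .rdi).toNat + 1752, (u.reg .rdi).toNat + 1784⟩] →
      (Codebook.svBlock u.mem (u.reg .rsi).toNat).base + (Codebook.svBlock u.mem (u.reg .rsi).toNat).size ≤ w.lo ∨
        w.hi ≤ (Codebook.svBlock u.mem (u.reg .rsi).toNat).base := by
    intro hse
    have hsv := h.apart.sv hse
    have hsz : 1 ≤ (Codebook.svBlock u.mem (u.reg .rsi).toNat).size := by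
      simp only []
      omega
    have hblk := blk_where h.reader.env.live h.reader.shadow.inv h.reader.shadow.offText (by omega) (h.cb.K4.sv hse) hsz
    simp only [vblock, Off.sizeof.stb_vorbis] at hsv
    simp only [] at hblk
    simp only [List.forall_mem_cons, List.not_mem_nil, false_imp_iff, implies_true, and_true]
    omega
  have hkept : (Codebook.block (u.reg .rsi).toNat).Kept u.mem m :=
    Block.Kept.of_sameExcept hs hd1 (Codebook.block_no_wrap h.ok hB hin)
  exact ⟨h.cb.frame_sameExcept h.ok hB hin hs hd1 hd2, h.apart.frame (Codebook.SameFields.of_kept hkept)⟩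

/-- A load of a stack slot above the spill area `[rsp − 96, rsp − 56)` reads the same after the spills and return-address
pushes of this segment. -/
theorem slot_kept {r m : Mem} {sp a : Word} {x : Word} (hS : Mem.SameExcept [⟨sp.toNat - 96, sp.toNat - 56⟩] r m)
    (ha : sp.toNat - 56 ≤ a.toNat) (hlt : a.toNat + 8 < 2 ^ 64) (h : UInt64.ofNat (r.readLE a 8) = x) :
    UInt64.ofNat (m.readLE a 8) = x := by
  rw [hS.readLE a 8 hlt ?_]
  · exact h
  · intro w hw
    have e1 : w = ⟨sp.toNat - 96, sp.toNat - 56⟩ := List.mem_singleton.mp hw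
    subst e1
    simp only
    omega

/-- **The exit assertions' common part, built**: `r` is the memory prep_huffman returned (with this function's footprint
`hsamer`, the reader's post `hrp`, no shadow byte written `hunr`, the return address and the six saved registers in their slots),
`v` a later state of this segment whose memory differs from `r` only inside the spill area `[rsp − 96, rsp − 56)` of the frame
(the slots `[rsp+10H]`, `[rsp+18H]` and the return addresses of the check calls). -/
theorem common_of {others : List Obj} {frames : List (Nat × FrameLayout)} {Blk : Block → Prop} {len : Nat} {u₀ : State}
    {ret : Word} {e v : State} {r : Mem}
    (he : AtEntry (conv u₀) L.codebook_decode_scalar_raw.entry (codebook_decode_scalar_raw.spec others frames Blk len).frame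
      ret e)
    (hpre : BookPre others frames Blk len e)
    (hroom : 0x700000 + 384 ≤ (e.reg .rsp).toNat) (htop : (e.reg .rsp).toNat + 8 ≤ 0x800000)
    (hrp : ReaderPost Blk len e.mem r (e.reg .rdi).toNat)
    (hsamer : Mem.SameExcept
      [⟨(e.reg .rsp).toNat - 384, (e.reg .rsp).toNat⟩,
       ⟨(e.reg .rdi).toNat + 48, (e.reg .rdi).toNat + 56⟩, ⟨(e.reg .rdi).toNat + 84, (e.reg .rdi).toNat + 96⟩,
       ⟨(e.reg .rdi).toNat + 136, (e.reg .rdi).toNat + 144⟩, ⟨(e.reg .rdi).toNat + 1484, (e.reg .rdi).toNat + 1749⟩,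
       ⟨(e.reg .rdi).toNat + 1752, (e.reg .rdi).toNat + 1784⟩] e.mem r)
    (hunr : ShadowUntouched e.mem r)
    (hS : Mem.SameExcept [⟨(e.reg .rsp).toNat - 96, (e.reg .rsp).toNat - 56⟩] r v.mem)
    (hs0 : UInt64.ofNat (r.readLE (e.reg .rsp) 8) = ret)
    (hs1 : UInt64.ofNat (r.readLE (e.reg .rsp - 8) 8) = e.reg .r15)
    (hs2 : UInt64.ofNat (r.readLE (e.reg .rsp - 16) 8) = e.reg .r14)
    (hs3 : UInt64.ofNat (r.readLE (e.reg .rsp - 24) 8) = e.reg .r13)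
    (hs4 : UInt64.ofNat (r.readLE (e.reg .rsp - 32) 8) = e.reg .r12)
    (hs5 : UInt64.ofNat (r.readLE (e.reg .rsp - 40) 8) = e.reg .rbp)
    (hs6 : UInt64.ofNat (r.readLE (e.reg .rsp - 48) 8) = e.reg .rbx)
    (hrsp : v.reg .rsp = e.reg .rsp - 88)
    (hcode : CodeOK u₀ v.mem) (hinv : abiInv v) :
    ScalarRaw.Common others frames Blk len u₀ ret e v ∧ Codebook.SameFields r v.mem (e.reg .rsi).toNat := by
  have hwf := hpre.reader.where_obj
  have hwc := book_where hpre hroom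
  -- this function's footprint
  have hsame : Mem.SameExcept
      [⟨(e.reg .rsp).toNat - 384, (e.reg .rsp).toNat⟩,
       ⟨(e.reg .rdi).toNat + 48, (e.reg .rdi).toNat + 56⟩, ⟨(e.reg .rdi).toNat + 84, (e.reg .rdi).toNat + 96⟩,
       ⟨(e.reg .rdi).toNat + 136, (e.reg .rdi).toNat + 144⟩, ⟨(e.reg .rdi).toNat + 1484, (e.reg .rdi).toNat + 1749⟩,
       ⟨(e.reg .rdi).toNat + 1752, (e.reg .rdi).toNat + 1784⟩] e.mem v.mem := by
    refine Vorbis.Spec.Reader.sameExcept_through_callee hsamer hS ?_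
    simp only [List.forall_mem_cons, List.not_mem_nil, false_imp_iff, implies_true, and_true, X86.User.inSpans_cons,
      X86.User.inSpans_nil, or_false]
    omega
  -- no shadow byte
  have hun : ShadowUntouched e.mem v.mem := by
    refine Mem.EqOn.trans hunr (hS.eqOn _ _ ?_)
    intro w hw
    have e1 : w = ⟨(e.reg .rsp).toNat - 96, (e.reg .rsp).toNat - 56⟩ := List.mem_singleton.mp hw
    subst e1
    simp only
    omega
  -- the reader
  obtain ⟨hb, hmu⟩ := Vorbis.Spec.Reader.reader_of_window hrp.bits hS (by omega)
  have hmu0 := hrp.mu_le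
  have hrp' : ReaderPost Blk len e.mem v.mem (e.reg .rdi).toNat := ⟨hb, by omega⟩
  -- the book
  obtain ⟨hcb, hap⟩ := book_carry hpre hroom htop hsame
  -- the struct is off the spill area
  obtain ⟨B, hB, hin⟩ := hpre.book
  have hkept : (Codebook.block (e.reg .rsi).toNat).Kept r v.mem := by
    refine Block.Kept.of_sameExcept hS ?_ (Codebook.block_no_wrap hpre.ok hB hin)
    intro w hw
    have e1 : w = ⟨(e.reg .rsp).toNat - 96, (e.reg .rsp).toNat - 56⟩ := List.mem_singleton.mp hw
    subst e1
    simp only [Off.sizeof.Codebook]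
    omega
  refine ⟨⟨⟨he, hrsp, ?_, ?_, ?_, ?_, ?_, ?_, ?_, ?_, hcode, hinv, hun⟩, hpre, hrp', hcb, hap⟩,
    Codebook.SameFields.of_kept hkept⟩
  · exact slot_kept hS (by u_omega) (by u_omega) hs0
  · exact slot_kept hS (by u_omega) (by u_omega) hs1
  · exact slot_kept hS (by u_omega) (by u_omega) hs2
  · exact slot_kept hS (by u_omega) (by u_omega) hs3
  · exact slot_kept hS (by u_omega) (by u_omega) hs4
  · exact slot_kept hS (by u_omega) (by u_omega) hs5
  · exact slot_kept hS (by u_omega) (by u_omega) hs6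
  · simp only [X86.User.Spec.footprint, vspec]
    exact hsame

/-- A pointer spilled to the stack (`mov [rsp+0x10], rax`) is read back as the same number. -/
theorem ptr_slot (m : Mem) (c : Nat) :
    (UInt64.ofNat (Codebook.codewords m c)).toNat = Codebook.codewords m c := by
  have h : Codebook.codewords m c < 2 ^ 64 := Mem.ptr_lt m _
  exact toNat_addr _ h

/-- `c->entries` spilled to the stack as a dword (`mov [rsp+0x18], eax`) is the field's value: it is not negative (K1). -/
theorem entries_slot (m : Mem) (c : Nat) (h : 0 ≤ Codebook.entries m c) :
    (BitVec.ofNat 32 (m.u32 (c + 4))).toNat = (Codebook.entries m c).toNat := by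
  have e : Codebook.entries m c = sint32 (m.u32 (c + 4)) := rfl
  have hlt := Mem.u32_lt m (c + 4)
  rw [e] at h ⊢
  rw [BitVec.toNat_ofNat, Nat.mod_eq_of_lt hlt]
  have := sint32_cases (m.u32 (c + 4))
  omega

end Vorbis.Spec.codebook_decode_scalar_raw_1

/-- Segment 1 of `codebook_decode_scalar_raw` (0x10d5c0 – 0x10d628 + 0x10d6ac – 0x10d6da; stb_vorbis_fixed.c:1684 – 1693): the
prologue, `prep_huffman(f)`, the both-NULL test and the path choice by pointer tests, from the function's entry to one of the
three cut points `cut2` (binary search, `AtBinary`), `cut7` (linear search, `AtLinear`), `cut5` (exit join with r12d = −1,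
`AtExit`). Two walks (up to the call, after it); four check sites, all fields of `*c`; nine paths after the call, three of
them contradictory. Every exit assertion is built by `common_of` from the state prep_huffman returned. -/
theorem Vorbis.Spec.Worked.codebook_decode_scalar_raw_1_ok : Vorbis.Spec.codebook_decode_scalar_raw_1.Statement := by
  intro Lay hLay μ hμ u₀ hcode h_prep hload8 hload4 others frames Blk len ret u he hpre
  have he0 := he
  have hpre0 := hpre
  v_entry he
  have hprep := h_prep others frames Blk len
  have hsp := hpre.reader.shadow.rsp
  have hwhere := hpre.reader.where_obj
  have hbwhere := Vorbis.Spec.codebook_decode_scalar_raw_1.book_where hpre he_room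
  have hL : BlkLive Blk (Live (stackObjs frames ++ others)) := hpre.reader.env.live
  obtain ⟨B, hB, hin⟩ := hpre.book
  -- `c`, the codebook's address as a number
  obtain ⟨c, hc⟩ : ∃ c : Nat, (u.reg .rsi).toNat = c := ⟨_, rfl⟩
  have hrc : u.reg .rsi = addr c := eq_addr _ _ hc
  rw [hc] at hin hbwhere
  -- 0x10d5c0 … 0x10d5d6 (stb_vorbis_fixed.c:1684 – 1686): six pushes, `sub rsp, 0x28`, `[rsp+8] := f`, `rbp := c`, `call prep_huffman`
  u_walk hcode [hμ.vendor] until [Vorbis.L.codebook_decode_scalar_raw.cut2, Vorbis.L.codebook_decode_scalar_raw.cut7, Vorbis.L.codebook_decode_scalar_raw.cut5] span [Vorbis.L.textLo, Vorbis.L.textHi] side (v_side)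
  case call_inv =>
    v_inv
  case pre_10d5d6 =>
    have hun : ShadowUntouched u.mem s_10d5d6.mem := by v_untouched
    have hrdi : s_10d5d6.reg .rdi = u.reg .rdi := w_kept.get .rdi rfl
    refine hpre.reader.again (hpre.reader.shadow.call hun (by u_omega) (by u_omega) (by u_omega)) hrdi ?_
    have hsame : Mem.SameExcept [⟨(u.reg .rsp).toNat - 96, (u.reg .rsp).toNat⟩] u.mem s_10d5d6.mem := by
      u_same
    exact (Vorbis.Spec.Reader.reader_of_window hpre.reader.bits hsame (by omega)).1
  -- 0x10d5db, the state prep_huffman returned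
  have c_rdi : s_10d5d6.reg .rdi = u.reg .rdi := w_kept_10d5d6.get .rdi rfl
  have hpost : Vorbis.Spec.PrepHuffmanPost Blk len (s_10d5d6.reg .rdi).toNat s_10d5d6 s_10d5d6r := w_post
  rw [c_rdi] at hpost
  have w_eq := Vorbis.conv_code_eqOn w_code
  have w_df := (show X86.User.abiInv _ from w_inv).1
  have w_mx := (show X86.User.abiInv _ from w_inv).2
  have w_sse := Vorbis.sseOK_of_abiInv w_inv
  simp only [X86.User.Spec.footprint, vspec, w_rsp_10d5d6, c_rdi] at w_same
  -- the stack slots, through the callee's footprint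
  have hp0 : UInt64.ofNat (s_10d5d6.mem.readLE (u.reg .rsp) 8) = ret := by u_resolve
  have hp1 : UInt64.ofNat (s_10d5d6.mem.readLE (u.reg .rsp - 8) 8) = u.reg .r15 := by u_resolve
  have hp2 : UInt64.ofNat (s_10d5d6.mem.readLE (u.reg .rsp - 16) 8) = u.reg .r14 := by u_resolve
  have hp3 : UInt64.ofNat (s_10d5d6.mem.readLE (u.reg .rsp - 24) 8) = u.reg .r13 := by u_resolve
  have hp4 : UInt64.ofNat (s_10d5d6.mem.readLE (u.reg .rsp - 32) 8) = u.reg .r12 := by u_resolve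
  have hp5 : UInt64.ofNat (s_10d5d6.mem.readLE (u.reg .rsp - 40) 8) = u.reg .rbp := by u_resolve
  have hp6 : UInt64.ofNat (s_10d5d6.mem.readLE (u.reg .rsp - 48) 8) = u.reg .rbx := by u_resolve
  have hp7 : UInt64.ofNat (s_10d5d6.mem.readLE (u.reg .rsp - 80) 8) = u.reg .rdi := by u_resolve
  have hs0 : UInt64.ofNat (s_10d5d6r.mem.readLE (u.reg .rsp) 8) = ret := by u_frame hp0
  have hs1 : UInt64.ofNat (s_10d5d6r.mem.readLE (u.reg .rsp - 8) 8) = u.reg .r15 := by u_frame hp1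
  have hs2 : UInt64.ofNat (s_10d5d6r.mem.readLE (u.reg .rsp - 16) 8) = u.reg .r14 := by u_frame hp2
  have hs3 : UInt64.ofNat (s_10d5d6r.mem.readLE (u.reg .rsp - 24) 8) = u.reg .r13 := by u_frame hp3
  have hs4 : UInt64.ofNat (s_10d5d6r.mem.readLE (u.reg .rsp - 32) 8) = u.reg .r12 := by u_frame hp4
  have hs5 : UInt64.ofNat (s_10d5d6r.mem.readLE (u.reg .rsp - 40) 8) = u.reg .rbp := by u_frame hp5
  have hs6 : UInt64.ofNat (s_10d5d6r.mem.readLE (u.reg .rsp - 48) 8) = u.reg .rbx := by u_frame hp6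
  have hs7 : UInt64.ofNat (s_10d5d6r.mem.readLE (u.reg .rsp - 80) 8) = u.reg .rdi := by u_frame hp7
  clear hp0 hp1 hp2 hp3 hp4 hp5 hp6 hp7
  rw [w_mem_10d5d6] at w_same
  -- `Bits f` and μ at the returned state: the pushes are off `*f`, then the callee's post
  have hS01 : Mem.SameExcept [⟨(u.reg .rsp).toNat - 96, (u.reg .rsp).toNat⟩] u.mem s_10d5d6.mem := by
    u_same
  obtain ⟨hb1, hmu1⟩ := Vorbis.Spec.Reader.reader_of_window hpre.reader.bits hS01 (by omega)
  have hmu2 := hpost.reader.mu_le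
  have hrpr : ReaderPost Blk len u.mem s_10d5d6r.mem (u.reg .rdi).toNat :=
    ⟨hpost.reader.bits, by omega⟩
  -- this function's footprint up to here
  have hsamer : Mem.SameExcept
      [⟨(u.reg .rsp).toNat - 384, (u.reg .rsp).toNat⟩,
       ⟨(u.reg .rdi).toNat + 48, (u.reg .rdi).toNat + 56⟩, ⟨(u.reg .rdi).toNat + 84, (u.reg .rdi).toNat + 96⟩,
       ⟨(u.reg .rdi).toNat + 136, (u.reg .rdi).toNat + 144⟩, ⟨(u.reg .rdi).toNat + 1484, (u.reg .rdi).toNat + 1749⟩,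
       ⟨(u.reg .rdi).toNat + 1752, (u.reg .rdi).toNat + 1784⟩] u.mem s_10d5d6r.mem := by
    u_same
  have hunr : ShadowUntouched u.mem s_10d5d6r.mem := by v_untouched
  -- the three fields of `*c` the segment loads, named
  have r40 : s_10d5d6r.mem.readLE (addr c + 40) 8 = Codebook.codewords s_10d5d6r.mem c := by
    simp only [vfield, vacc, voff]
  have r4 : s_10d5d6r.mem.readLE (addr c + 4) 4 = s_10d5d6r.mem.u32 (c + 4) := by
    simp only [vfield]
  have r2096 : s_10d5d6r.mem.readLE (addr c + 2096) 8 = Codebook.sorted_codewords s_10d5d6r.mem c := by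
    simp only [vfield, vacc, voff]
  -- what every exit shares, for a state whose memory differs from the returned one inside the spill area only
  have hcommon := fun (v : State) hS hrsp hcode hinv =>
    Vorbis.Spec.codebook_decode_scalar_raw_1.common_of (v := v) he0 hpre0 he_room he_top hrpr hsamer hunr hS
      hs0 hs1 hs2 hs3 hs4 hs5 hs6 hrsp hcode hinv
  -- 0x10d5db … 0x10d628 + 0x10d6ac … 0x10d6da (stb_vorbis_fixed.c:1688 – 1693): the pointer tests, to `cut2` / `cut7` / `cut5`
  u_walk hcode [hμ.vendor] until [Vorbis.L.codebook_decode_scalar_raw.cut2, Vorbis.L.codebook_decode_scalar_raw.cut7, Vorbis.L.codebook_decode_scalar_raw.cut5] span [Vorbis.L.textLo, Vorbis.L.textHi] side (v_side)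
  · -- 0x10d5df, load8 [c + 0x28] (`c->codewords`): a field of `*c`
    have hun : ShadowUntouched u.mem s_10d5df.mem := by v_untouched
    have hs := Codebook.site_field hL hB hin 40 8 (by decide) (by decide) rfl
    exact Vorbis.Spec.check_site hpre.reader.shadow.inv hun hs (by u_omega)
  · -- 0x10d6b3, load8 [c + 0x830] (`c->sorted_codewords`), the both-NULL test
    have hun : ShadowUntouched u.mem s_10d6b3.mem := by v_untouched
    have hs := Codebook.site_field hL hB hin 2096 8 (by decide) (by decide) rfl
    exact Vorbis.Spec.check_site hpre.reader.shadow.inv hun hs (by u_omega)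
  · -- 0x10d5fa, load4 [c + 4] (`c->entries`), after `codewords = NULL`
    have hun : ShadowUntouched u.mem s_10d5fa.mem := by v_untouched
    have hs := Codebook.site_field hL hB hin 4 4 (by decide) (by decide) rfl
    exact Vorbis.Spec.check_site hpre.reader.shadow.inv hun hs (by u_omega)
  · -- 0x10d616, load8 [c + 0x830] (`c->sorted_codewords`), `entries > 8`
    have hun : ShadowUntouched u.mem s_10d616.mem := by v_untouched
    have hs := Codebook.site_field hL hB hin 2096 8 (by decide) (by decide) rfl
    exact Vorbis.Spec.check_site hpre.reader.shadow.inv hun hs (by u_omega)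
  · -- 0x10d5fa, load4 [c + 4] (`c->entries`), after `codewords ≠ NULL`
    have hun : ShadowUntouched u.mem s_10d5fa.mem := by v_untouched
    have hs := Codebook.site_field hL hB hin 4 4 (by decide) (by decide) rfl
    exact Vorbis.Spec.check_site hpre.reader.shadow.inv hun hs (by u_omega)
  · -- 0x10d616, load8 [c + 0x830] (`c->sorted_codewords`), `entries > 8`
    have hun : ShadowUntouched u.mem s_10d616.mem := by v_untouched
    have hs := Codebook.site_field hL hB hin 2096 8 (by decide) (by decide) rfl
    exact Vorbis.Spec.check_site hpre.reader.shadow.inv hun hs (by u_omega)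
  · -- path 1: `codewords = NULL`, `entries ≤ 8`, `al = (codewords == NULL) = 0`: contradiction
    exfalso
    rw [hbr_10d5f0] at hbr_10d628
    exact absurd hbr_10d628 (by decide)
  · -- path 2: `codewords = NULL`, `sorted_codewords ≠ NULL`, `entries ≤ 8`, `al = 1`: the binary search (0x10d62e)
    have hS : Mem.SameExcept [⟨(u.reg .rsp).toNat - 96, (u.reg .rsp).toNat - 56⟩] s_10d5d6r.mem s_10d628.mem := by
      u_same
    have hinv : X86.User.abiInv s_10d628 := by v_inv
    have hf : UInt64.ofNat (s_10d628.mem.readLE (u.reg .rsp - 80) 8) = u.reg .rdi := by u_resolve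
    obtain ⟨hcom, hsf⟩ := hcommon s_10d628 hS w_rsp w_eq hinv
    rw [hc] at hsf
    refine ReachVia.done (Or.inl ⟨w_rip, hcom, ?_, hf, ?_⟩)
    · rw [w_rbp, hrc]
    · rw [hc, hsf.sorted_codewords]
      intro h0
      rw [h0] at hbr_10d6c0
      exact hbr_10d6c0 rfl
  · -- path 3: `sorted_codewords ≠ NULL` at the first test, `= NULL` at the second: contradiction
    exfalso
    rw [if_pos hbr_10d6c0] at hbr_10d628
    exact absurd hbr_10d628 (by decide)
  · -- path 4: `codewords = NULL`, `sorted_codewords ≠ NULL`, `entries > 8`: the binary search (0x10d62e)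
    have hS : Mem.SameExcept [⟨(u.reg .rsp).toNat - 96, (u.reg .rsp).toNat - 56⟩] s_10d5d6r.mem s_10d628.mem := by
      u_same
    have hinv : X86.User.abiInv s_10d628 := by v_inv
    have hf : UInt64.ofNat (s_10d628.mem.readLE (u.reg .rsp - 80) 8) = u.reg .rdi := by u_resolve
    obtain ⟨hcom, hsf⟩ := hcommon s_10d628 hS w_rsp w_eq hinv
    rw [hc] at hsf
    refine ReachVia.done (Or.inl ⟨w_rip, hcom, ?_, hf, ?_⟩)
    · rw [w_rbp, hrc]
    · rw [hc, hsf.sorted_codewords]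
      intro h0
      rw [h0] at hbr_10d6c0
      exact hbr_10d6c0 rfl
  · -- path 5: both NULL: `return -1` (0x10d775 with r12d = −1)
    have hS : Mem.SameExcept [⟨(u.reg .rsp).toNat - 96, (u.reg .rsp).toNat - 56⟩] s_10d5d6r.mem s_10d6cc.mem := by
      u_same
    have hinv : X86.User.abiInv s_10d6cc := by v_inv
    obtain ⟨hcom, hsf⟩ := hcommon s_10d6cc hS w_rsp w_eq hinv
    refine ReachVia.done (Or.inr (Or.inr ⟨w_rip, hcom.mid, hcom.reader, ?_, ?_⟩))
    · rw [w_r12]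
      decide
    · rw [w_r12]
      exact Or.inl (by decide)
  · -- path 6: `codewords ≠ NULL`, `entries ≤ 8`, `al = 0`: the linear search (0x10d8a5)
    have hcw : Codebook.codewords s_10d5d6r.mem c ≠ 0 := by
      intro h0
      rw [h0] at hbr_10d5f0
      exact hbr_10d5f0 rfl
    have hS : Mem.SameExcept [⟨(u.reg .rsp).toNat - 96, (u.reg .rsp).toNat - 56⟩] s_10d5d6r.mem s_10d628.mem := by
      u_same
    have hinv : X86.User.abiInv s_10d628 := by v_inv
    have hf : UInt64.ofNat (s_10d628.mem.readLE (u.reg .rsp - 80) 8) = u.reg .rdi := by u_resolve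
    have hcws : s_10d628.mem.readLE (u.reg .rsp - 72) 8 =
        (UInt64.ofNat (Codebook.codewords s_10d5d6r.mem c)).toNat := by
      rw [w_mem]
      u_read
    have hens : s_10d628.mem.readLE (u.reg .rsp - 64) 4 = (BitVec.ofNat 32 (s_10d5d6r.mem.u32 (c + 4))).toNat := by
      rw [w_mem]
      u_read
    obtain ⟨hcom, hsf⟩ := hcommon s_10d628 hS w_rsp w_eq hinv
    have hent := hcom.cb.K1.ent_nonneg
    rw [hc] at hsf hent
    refine ReachVia.done (Or.inr (Or.inl ⟨w_rip, hcom, ?_, hf, ?_, ?_, ?_⟩))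
    · rw [w_rbp, hrc]
    · rw [hc, hsf.codewords, hcws]
      exact Vorbis.Spec.codebook_decode_scalar_raw_1.ptr_slot _ _
    · rw [hc, hsf.codewords]
      exact hcw
    · rw [hsf.entries] at hent
      rw [hc, hens, hsf.entries]
      exact Vorbis.Spec.codebook_decode_scalar_raw_1.entries_slot _ _ hent
  · -- path 7: `codewords ≠ NULL`, `entries ≤ 8`, `al = (codewords == NULL) = 1`: contradiction
    exfalso
    apply hbr_10d628
    rw [if_neg ?_]
    · rfl
    · rw [Nat.mod_eq_of_lt (UInt64.toNat_lt _)]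
      exact hbr_10d5f0
  · -- path 8: `codewords ≠ NULL`, `entries > 8`, `sorted_codewords = NULL`: the linear search (0x10d8a5)
    have hcw : Codebook.codewords s_10d5d6r.mem c ≠ 0 := by
      intro h0
      rw [h0] at hbr_10d5f0
      exact hbr_10d5f0 rfl
    have hS : Mem.SameExcept [⟨(u.reg .rsp).toNat - 96, (u.reg .rsp).toNat - 56⟩] s_10d5d6r.mem s_10d628.mem := by
      u_same
    have hinv : X86.User.abiInv s_10d628 := by v_inv
    have hf : UInt64.ofNat (s_10d628.mem.readLE (u.reg .rsp - 80) 8) = u.reg .rdi := by u_resolve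
    have hcws : s_10d628.mem.readLE (u.reg .rsp - 72) 8 =
        (UInt64.ofNat (Codebook.codewords s_10d5d6r.mem c)).toNat := by
      rw [w_mem]
      u_read
    have hens : s_10d628.mem.readLE (u.reg .rsp - 64) 4 = (BitVec.ofNat 32 (s_10d5d6r.mem.u32 (c + 4))).toNat := by
      rw [w_mem]
      u_read
    obtain ⟨hcom, hsf⟩ := hcommon s_10d628 hS w_rsp w_eq hinv
    have hent := hcom.cb.K1.ent_nonneg
    rw [hc] at hsf hent
    refine ReachVia.done (Or.inr (Or.inl ⟨w_rip, hcom, ?_, hf, ?_, ?_, ?_⟩))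
    · rw [w_rbp, hrc]
    · rw [hc, hsf.codewords, hcws]
      exact Vorbis.Spec.codebook_decode_scalar_raw_1.ptr_slot _ _
    · rw [hc, hsf.codewords]
      exact hcw
    · rw [hsf.entries] at hent
      rw [hc, hens, hsf.entries]
      exact Vorbis.Spec.codebook_decode_scalar_raw_1.entries_slot _ _ hent
  · -- path 9: `codewords ≠ NULL`, `entries > 8`, `sorted_codewords ≠ NULL`: the binary search (0x10d62e)
    have hS : Mem.SameExcept [⟨(u.reg .rsp).toNat - 96, (u.reg .rsp).toNat - 56⟩] s_10d5d6r.mem s_10d628.mem := by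
      u_same
    have hinv : X86.User.abiInv s_10d628 := by v_inv
    have hf : UInt64.ofNat (s_10d628.mem.readLE (u.reg .rsp - 80) 8) = u.reg .rdi := by u_resolve
    obtain ⟨hcom, hsf⟩ := hcommon s_10d628 hS w_rsp w_eq hinv
    rw [hc] at hsf
    refine ReachVia.done (Or.inl ⟨w_rip, hcom, ?_, hf, ?_⟩)
    · rw [w_rbp, hrc]
    · rw [hc, hsf.sorted_codewords]
      intro h0
      rw [h0] at hbr_10d628
      exact hbr_10d628 (by decide)
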